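-- pv_equiv track=rewrite | github.com/alekgit/python-project-lvl2 | gendiff/builder.py | buildInnerStructure
-- ===== SOURCE A (Python) =====
-- def buildInnerStructure(obj1, obj2):
--     keys = sorted((set().union(obj1.keys(), obj2.keys())))
--
--     nodes = []
--     for key in keys:
--         if key in obj1 and key in obj2:
--             old_value = obj1[key]
--             new_value = obj2[key]
--             if old_value == new_value:
--                 node = {
--                     "type": "unchanged",
--                     "key": key,
--                     "old_value": old_value,
--                     "new_value": new_value,
--                 }
--             else:
--                 node = {
--                     "type": "changed",
--                     "key": key,
--                     "old_value": old_value,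
--                     "new_value": new_value,
--                 }
--         else:
--             if key in obj1:
--                 old_value = obj1[key]
--                 node = {
--                     "type": "removed",
--                     "key": key,
--                     "old_value": old_value,
--                     "new_value": None,
--                 }
--             else:
--                 new_value = obj2[key]
--                 node = {
--                     "type": "added",
--                     "key": key,
--                     "old_value": None,
--                     "new_value": new_value,
--                 }
--         nodes.append(node)
--
--     return nodes
-- ===== SOURCE B (Python) =====
-- def buildInnerStructure(obj1, obj2):
--     removed = [(k, {"type": "removed", "key": k, "old_value": v, "new_value": None})
--                for k, v in obj1.items() if k not in obj2]
--     added = [(k, {"type": "added", "key": k, "old_value": None, "new_value": v})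
--              for k, v in obj2.items() if k not in obj1]
--     common = [(k, {"type": "unchanged" if v == obj2[k] else "changed",
--                    "key": k, "old_value": v, "new_value": obj2[k]})
--               for k, v in obj1.items() if k in obj2]
--     return [node for _, node in sorted(removed + added + common, key=lambda p: p[0])]
-- ===== Notes on version B (the rewrite author's own statement) =====
-- stated objective: alternative
-- what changed: Instead of one branching pass over the sorted union of keys, B partitions the items into removed/added/common by three comprehensions and sorts the concatenated (key, node) pairs by key at the end.
import Mathlib
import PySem

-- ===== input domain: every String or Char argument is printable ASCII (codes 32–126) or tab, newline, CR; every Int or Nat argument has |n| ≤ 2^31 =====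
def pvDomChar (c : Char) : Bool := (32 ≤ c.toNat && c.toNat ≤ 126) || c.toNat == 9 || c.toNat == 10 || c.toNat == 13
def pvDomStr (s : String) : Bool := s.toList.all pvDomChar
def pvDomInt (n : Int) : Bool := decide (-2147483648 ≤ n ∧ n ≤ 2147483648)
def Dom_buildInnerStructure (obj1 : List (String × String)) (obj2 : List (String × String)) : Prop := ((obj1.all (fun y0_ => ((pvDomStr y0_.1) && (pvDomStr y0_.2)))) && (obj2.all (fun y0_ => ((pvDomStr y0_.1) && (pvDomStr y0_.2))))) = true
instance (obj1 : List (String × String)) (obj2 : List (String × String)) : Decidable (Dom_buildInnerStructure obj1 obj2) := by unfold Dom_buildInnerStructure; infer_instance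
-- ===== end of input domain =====

-- B restructures A's single branching pass into a categorize-then-sort decomposition (same cost); equivalence is exact.

-- ===== PORT A =====
def buildInnerStructure (obj1 : List (String × String)) (obj2 : List (String × String)) : List (List (String × Option String)) :=
  let d1 : PySem.Dict String String := PySem.Dict.ofList obj1
  let d2 : PySem.Dict String String := PySem.Dict.ofList obj2
  let keys := PySem.List.sorted
      (PySem.Set.update (PySem.Set.update PySem.Set.empty (PySem.Dict.keys d1)) (PySem.Dict.keys d2))
      (fun k => k) false
  keys.foldl (fun nodes key =>
    nodes ++ [
      if PySem.Dict.contains d1 key && PySem.Dict.contains d2 key then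
        -- obj1[key] / obj2[key]: the contains-guard holds, so getD is exact
        let old_value := PySem.Dict.getD d1 key ""
        let new_value := PySem.Dict.getD d2 key ""
        if old_value == new_value then
          [("type", some "unchanged"), ("key", some key), ("old_value", some old_value), ("new_value", some new_value)]
        else
          [("type", some "changed"), ("key", some key), ("old_value", some old_value), ("new_value", some new_value)]
      else if PySem.Dict.contains d1 key then
        [("type", some "removed"), ("key", some key), ("old_value", some (PySem.Dict.getD d1 key "")), ("new_value", (none : Option String))]
      else
        [("type", some "added"), ("key", some key), ("old_value", (none : Option String)), ("new_value", some (PySem.Dict.getD d2 key ""))]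
    ]) []

-- ===== PORT B =====
def buildInnerStructure_alt (obj1 : List (String × String)) (obj2 : List (String × String)) : List (List (String × Option String)) :=
  let d1 : PySem.Dict String String := PySem.Dict.ofList obj1
  let d2 : PySem.Dict String String := PySem.Dict.ofList obj2
  let removed := ((PySem.Dict.items d1).filter (fun p => !(PySem.Dict.contains d2 p.1))).map (fun p =>
      (p.1, [("type", some "removed"), ("key", some p.1), ("old_value", some p.2), ("new_value", (none : Option String))]))
  let added := ((PySem.Dict.items d2).filter (fun p => !(PySem.Dict.contains d1 p.1))).map (fun p =>
      (p.1, [("type", some "added"), ("key", some p.1), ("old_value", (none : Option String)), ("new_value", some p.2)]))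
  let common := ((PySem.Dict.items d1).filter (fun p => PySem.Dict.contains d2 p.1)).map (fun p =>
      (p.1, [("type", some (if p.2 == PySem.Dict.getD d2 p.1 "" then "unchanged" else "changed")),
             ("key", some p.1), ("old_value", some p.2), ("new_value", some (PySem.Dict.getD d2 p.1 ""))]))
  (PySem.List.sorted (removed ++ added ++ common) (fun p => p.1) false).map (fun p => p.2)

-- ===== PRECONDITION & SPEC =====
def Spec_buildInnerStructure (obj1 : List (String × String)) (obj2 : List (String × String)) (out : List (List (String × Option String))) : Prop := out = buildInnerStructure_alt obj1 obj2
instance (obj1 : List (String × String)) (obj2 : List (String × String)) (out : List (List (String × Option String))) : Decidable (Spec_buildInnerStructure obj1 obj2 out) := by unfold Spec_buildInnerStructure; infer_instance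

-- ===== CLAIM (what is proved, stated in full; the proofs are below) =====
def Claim_equal_buildInnerStructure : Prop := ∀ (obj1 : List (String × String)) (obj2 : List (String × String)), Dom_buildInnerStructure obj1 obj2 → Spec_buildInnerStructure obj1 obj2 (buildInnerStructure obj1 obj2)

-- ===== LEMMAS AND PROOFS =====
def nodeA (d1 d2 : PySem.Dict String String) (key : String) : List (String × Option String) :=
  if PySem.Dict.contains d1 key && PySem.Dict.contains d2 key then
    if PySem.Dict.getD d1 key "" == PySem.Dict.getD d2 key "" then
      [("type", some "unchanged"), ("key", some key), ("old_value", some (PySem.Dict.getD d1 key "")), ("new_value", some (PySem.Dict.getD d2 key ""))]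
    else
      [("type", some "changed"), ("key", some key), ("old_value", some (PySem.Dict.getD d1 key "")), ("new_value", some (PySem.Dict.getD d2 key ""))]
  else if PySem.Dict.contains d1 key then
    [("type", some "removed"), ("key", some key), ("old_value", some (PySem.Dict.getD d1 key "")), ("new_value", (none : Option String))]
  else
    [("type", some "added"), ("key", some key), ("old_value", (none : Option String)), ("new_value", some (PySem.Dict.getD d2 key ""))]

lemma stepA (obj1 obj2 : List (String × String)) :
    buildInnerStructure obj1 obj2 =
    (PySem.List.sorted (PySem.Set.ofList ((PySem.Dict.ofList obj1 : PySem.Dict String String).keys ++ (PySem.Dict.ofList obj2 : PySem.Dict String String).keys)) (fun k => k) false).map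
      (nodeA (PySem.Dict.ofList obj1) (PySem.Dict.ofList obj2)) := by
  simp only [buildInnerStructure, PySem.Set.ofList_append, PySem.Set.update_empty,
    PySem.List.foldl_append_singleton_eq_map, List.nil_append]
  rfl
def gp (d1 d2 : PySem.Dict String String) (k : String) : String × List (String × Option String) := (k, nodeA d1 d2 k)

def keyM (d1 d2 : PySem.Dict String String) : List String :=
  d1.keys.filter (fun k => !(PySem.Dict.contains d2 k)) ++ d2.keys.filter (fun k => !(PySem.Dict.contains d1 k))
    ++ d1.keys.filter (fun k => PySem.Dict.contains d2 k)


lemma stepB (obj1 obj2 : List (String × String)) :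
    buildInnerStructure_alt obj1 obj2 =
    (PySem.List.sorted ((keyM (PySem.Dict.ofList obj1) (PySem.Dict.ofList obj2)).map (gp (PySem.Dict.ofList obj1) (PySem.Dict.ofList obj2))) (fun p => p.1) false).map (fun p => p.2) := by
  set d1 : PySem.Dict String String := PySem.Dict.ofList obj1 with hd1
  set d2 : PySem.Dict String String := PySem.Dict.ofList obj2 with hd2
  have h1 : d1.keys.Nodup := by rw [hd1]; exact PySem.Dict.nodup_keys_ofList obj1
  have h2 : d2.keys.Nodup := by rw [hd2]; exact PySem.Dict.nodup_keys_ofList obj2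
  simp only [buildInnerStructure_alt, ← hd1, ← hd2,
    PySem.Dict.items_eq_map_keys d1 h1 "", PySem.Dict.items_eq_map_keys d2 h2 "",
    List.filter_map, List.map_map, keyM, List.map_append, Function.comp_def]
  congr 1
  congr 1
  congr 1
  · congr 1
    · apply List.map_congr_left
      intro k hk
      simp only [List.mem_filter] at hk
      have hc1 : PySem.Dict.contains d1 k = true := (PySem.Dict.contains_iff_mem_keys d1 k).2 hk.1
      have hc2 : PySem.Dict.contains d2 k = false := by simpa using hk.2
      simp [gp, nodeA, hc1, hc2]
    · apply List.map_congr_left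
      intro k hk
      simp only [List.mem_filter] at hk
      have hc1 : PySem.Dict.contains d1 k = false := by simpa using hk.2
      simp [gp, nodeA, hc1]
  · apply List.map_congr_left
    intro k hk
    simp only [List.mem_filter] at hk
    have hc1 : PySem.Dict.contains d1 k = true := (PySem.Dict.contains_iff_mem_keys d1 k).2 hk.1
    simp only [gp, nodeA, hc1, hk.2, Bool.and_self, if_true]
    by_cases h : PySem.Dict.getD d1 k "" == PySem.Dict.getD d2 k ""
    · simp [h]
    · simp [h]

lemma keyM_perm (d1 d2 : PySem.Dict String String) (h1 : d1.keys.Nodup) (h2 : d2.keys.Nodup) :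
    (PySem.Set.ofList (d1.keys ++ d2.keys) : List String).Perm (keyM d1 d2) := by
  rw [List.perm_ext_iff_of_nodup (PySem.Set.nodup_ofList _)]
  · intro x
    simp only [PySem.Set.mem_ofList, List.mem_append, keyM, List.mem_filter,
      ← PySem.Dict.contains_iff_mem_keys, Bool.not_eq_eq_eq_not, Bool.not_true]
    by_cases hx1 : PySem.Dict.contains d1 x = true <;> by_cases hx2 : PySem.Dict.contains d2 x = true <;>
      simp [hx1, hx2]
  · unfold keyM
    rw [List.nodup_append, List.nodup_append]
    refine ⟨⟨h1.filter _, h2.filter _, ?_⟩, h1.filter _, ?_⟩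
    · intro a ha b hb hab
      subst hab
      simp only [List.mem_filter, ← PySem.Dict.contains_iff_mem_keys, Bool.not_eq_eq_eq_not,
        Bool.not_true] at ha hb
      simp_all
    · intro a ha b hb hab
      subst hab
      simp only [List.mem_append, List.mem_filter, ← PySem.Dict.contains_iff_mem_keys,
        Bool.not_eq_eq_eq_not, Bool.not_true] at ha hb
      rcases ha with ha | ha <;> simp_all

lemma stepC (d1 d2 : PySem.Dict String String) (h1 : d1.keys.Nodup) (h2 : d2.keys.Nodup) :
    PySem.List.sorted ((keyM d1 d2).map (gp d1 d2)) (fun p => p.1) false =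
    (PySem.List.sorted (PySem.Set.ofList (d1.keys ++ d2.keys)) (fun k => k) false).map (gp d1 d2) := by
  apply PySem.List.sorted_eq_of_perm_of_pairwise_lt
  · exact ((PySem.List.sorted_perm _ _ _).trans (keyM_perm d1 d2 h1 h2)).map (gp d1 d2)
  · have hp := PySem.List.sorted_ofList_pairwise_lt (xs := d1.keys ++ d2.keys)
    exact hp.map (gp d1 d2) (fun a b h => h)

lemma main_eq (obj1 obj2 : List (String × String)) :
    buildInnerStructure obj1 obj2 = buildInnerStructure_alt obj1 obj2 := by
  rw [stepA, stepB, stepC _ _ (PySem.Dict.nodup_keys_ofList obj1) (PySem.Dict.nodup_keys_ofList obj2),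
    List.map_map]
  rfl

-- ===== VERDICT (by name: the statement is the Claim_ definition above) =====
theorem buildInnerStructure_spec : Claim_equal_buildInnerStructure := by
  intro obj1 obj2 _
  unfold Spec_buildInnerStructure
  exact main_eq obj1 obj2
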